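-- pv_equiv track=rewrite | github.com/atieso/busato-nuoviprodotti | export_new_products_from_ftp.py | autodetect_sku_header
-- ===== SOURCE A (Python) =====
-- from typing import List, Dict, Set, Optional
--
-- COMMON_SKU_HEADERS = [
--     "SKU", "sku", "Codice", "CODICE", "codice",
--     "CODART", "cod_articolo", "CodArt", "Cod_Art",
--     "Codice Articolo", "Articolo", "RIF_CODICE", "RIFCODE",
-- ]
--
-- def autodetect_sku_header(headers: List[str]) -> Optional[str]:
--     norm = { (h or "").strip().lower(): (h or "") for h in headers }
--     for candidate in [h.lower() for h in COMMON_SKU_HEADERS]: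
--         if candidate in norm:
--             return norm[candidate]
--     for h in headers:
--         hn = (h or "").strip().lower()
--         if "sku" == hn or hn.startswith("cod"):
--             return h or ""
--     return None
-- ===== SOURCE B (Python) =====
-- from typing import List, Optional
--
-- COMMON_SKU_HEADERS = [
--     "SKU", "sku", "Codice", "CODICE", "codice",
--     "CODART", "cod_articolo", "CodArt", "Cod_Art",
--     "Codice Articolo", "Articolo", "RIF_CODICE", "RIFCODE",
-- ]
--
-- def autodetect_sku_header(headers: List[str]) -> Optional[str]:
--     # Single pass over headers, no dict and no candidate loop: keep the header whose
--     # normalized form has the smallest priority index (later header wins ties, like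
--     # A's dict overwrite), plus the first fallback match; decide at the end.
--     cands = [c.lower() for c in COMMON_SKU_HEADERS]
--     best_rank = None
--     best = None
--     fallback = None
--     for h in headers:
--         hn = (h or "").strip().lower()
--         if hn in cands:
--             r = cands.index(hn)
--             if best_rank is None or r <= best_rank:
--                 best_rank = r
--                 best = h or ""
--         if fallback is None and (hn == "sku" or hn.startswith("cod")):
--             fallback = h or ""
--     if best_rank is not None:
--         return best
--     return fallback
-- ===== Notes on version B (the rewrite author's own statement) =====
-- stated objective: alternative
-- what changed: Replaced A's staged design (build a last-wins normalization dict, then loop over candidates, then a fallback loop) by one single pass over the headers that keeps the match with the smallest candidate-priority index (later header wins ties, matching the dict overwrite) together with the first fallback match, deciding at the end.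
import Mathlib
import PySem

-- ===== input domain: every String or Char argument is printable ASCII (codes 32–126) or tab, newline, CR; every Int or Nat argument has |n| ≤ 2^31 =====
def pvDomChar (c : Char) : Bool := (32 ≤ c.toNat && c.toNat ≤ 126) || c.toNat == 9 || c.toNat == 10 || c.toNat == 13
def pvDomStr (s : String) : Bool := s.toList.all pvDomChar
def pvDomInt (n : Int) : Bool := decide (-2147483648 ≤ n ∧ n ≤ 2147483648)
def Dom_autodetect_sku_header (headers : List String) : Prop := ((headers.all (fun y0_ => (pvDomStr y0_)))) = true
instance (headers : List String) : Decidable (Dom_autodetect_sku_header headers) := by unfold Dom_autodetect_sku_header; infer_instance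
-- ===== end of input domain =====

-- B replaces A's dict + candidate loop by a SINGLE pass over the headers that tracks
-- the minimum-priority-rank match (ties: later header wins) and the first fallback
-- match (objective: alternative).


-- module constant shared by both versions
def pvCOMMON_SKU_HEADERS : List String :=
  ["SKU", "sku", "Codice", "CODICE", "codice",
   "CODART", "cod_articolo", "CodArt", "Cod_Art",
   "Codice Articolo", "Articolo", "RIF_CODICE", "RIFCODE"]

-- (h or "").strip().lower() — for a str argument, `h or ""` is `h`
def pvNorm (h : String) : String := PySem.Str.lower (PySem.Str.strip h)

-- ===== PORT A =====
def pvCandLoopA (norm : PySem.Dict String String) : List String → Option String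
  | [] => none
  | c :: cs => if norm.contains c then norm.get? c else pvCandLoopA norm cs

def pvFallbackA : List String → Option String
  | [] => none
  | h :: t =>
    let hn := pvNorm h
    if hn == "sku" || PySem.Str.startswith hn "cod" then some h else pvFallbackA t

def autodetect_sku_header (headers : List String) : Option String :=
  let norm := headers.foldl (fun d h => d.insert (pvNorm h) h) PySem.Dict.empty
  match pvCandLoopA norm (pvCOMMON_SKU_HEADERS.map PySem.Str.lower) with
  | some v => some v
  | none => pvFallbackA headers

-- ===== PORT B =====
-- cands = [c.lower() for c in COMMON_SKU_HEADERS]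
def pvCands : List String := pvCOMMON_SKU_HEADERS.map PySem.Str.lower

-- loop body: state = (best_rank, best, fallback); cands is the list computed once before the loop
def pvStepB (cands : List String) (st : Option Nat × Option String × Option String)
    (h : String) : Option Nat × Option String × Option String :=
  let hn := pvNorm h
  let bb : Option Nat × Option String :=
    match PySem.List.index? cands hn, st.1 with
    | some r, none => (some r, some h)
    | some r, some b => if r ≤ b then (some r, some h) else (some b, st.2.1)
    | none, _ => (st.1, st.2.1)
  let fb : Option String :=
    match st.2.2 with
    | some x => some x
    | none => if hn == "sku" || PySem.Str.startswith hn "cod" then some h else none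
  (bb.1, bb.2, fb)

def autodetect_sku_header_alt (headers : List String) : Option String :=
  let st := headers.foldl (pvStepB pvCands) (none, none, none)
  match st.1 with
  | some _ => st.2.1
  | none => st.2.2

-- ===== PRECONDITION & SPEC =====
def Spec_autodetect_sku_header (headers : List String) (out : Option String) : Prop := out = autodetect_sku_header_alt headers
instance (headers : List String) (out : Option String) : Decidable (Spec_autodetect_sku_header headers out) := by unfold Spec_autodetect_sku_header; infer_instance

-- ===== CLAIM (what is proved, stated in full; the proofs are below) =====
def Claim_equal_autodetect_sku_header : Prop := ∀ (headers : List String), Dom_autodetect_sku_header headers → Spec_autodetect_sku_header headers (autodetect_sku_header headers)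

-- ===== LEMMAS AND PROOFS =====

-- proof-only helpers -----------------------------------------------------------

-- last header of l whose normalized form is c
def pvFfind (l : List String) (c : String) : Option String :=
  l.reverse.find? (fun h => pvNorm h == c)

-- "first candidate that has a match, returning its last match" (bridge form of A)
def pvCandLoopC (l : List String) : List String → Option String
  | [] => none
  | c :: cs =>
    match pvFfind l c with
    | some h => some h
    | none => pvCandLoopC l cs

-- best-match part of B's fold, in isolation
def pvStep1 (cands : List String) (acc : Option (Nat × String)) (h : String) :
    Option (Nat × String) :=
  match PySem.List.index? cands (pvNorm h), acc with
  | some r, none => some (r, h)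
  | some r, some (b, bs) => if r ≤ b then some (r, h) else some (b, bs)
  | none, _ => acc

def pvBest (cands l : List String) : Option (Nat × String) := l.foldl (pvStep1 cands) none

-- fallback part of B's fold, in isolation
def pvStepFb (fb : Option String) (h : String) : Option String :=
  match fb with
  | some x => some x
  | none =>
    if pvNorm h == "sku" || PySem.Str.startswith (pvNorm h) "cod" then some h else none

-- A-side lemmas ----------------------------------------------------------------

-- A's dict lookup = last matching header
theorem pv_get?_foldl_insert (l : List String) (d : PySem.Dict String String) (c : String) :
    (l.foldl (fun d h => d.insert (pvNorm h) h) d).get? c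
      = (l.reverse.find? (fun h => pvNorm h == c)).or (d.get? c) := by
  induction l generalizing d with
  | nil => simp
  | cons h t ih =>
    simp only [List.foldl_cons, List.reverse_cons, List.find?_append, ih]
    by_cases hc : pvNorm h = c
    · rw [hc, PySem.Dict.get?_insert_self]
      simp [List.find?, hc]
    · rw [PySem.Dict.get?_insert_of_ne _ _ (Ne.symm hc)]
      have hb : (pvNorm h == c) = false := by simp [hc]
      simp [List.find?, hb]

theorem pv_candLoop_eq (headers : List String) (cs : List String) :
    pvCandLoopA (headers.foldl (fun d h => d.insert (pvNorm h) h) PySem.Dict.empty) cs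
      = pvCandLoopC headers cs := by
  induction cs with
  | nil => rfl
  | cons c cs ih =>
    have hget := pv_get?_foldl_insert headers PySem.Dict.empty c
    simp only [PySem.Dict.get?_empty, Option.or_none] at hget
    simp only [pvCandLoopA, pvCandLoopC, PySem.Dict.contains_eq_isSome_get?, hget, ih, pvFfind]
    cases headers.reverse.find? (fun h => pvNorm h == c) <;> simp

-- B-side: the fold splits into its three components --------------------------

theorem pv_fold_split (cands : List String) (l : List String) (acc : Option (Nat × String))
    (fb : Option String) :
    l.foldl (pvStepB cands) (acc.map Prod.fst, acc.map Prod.snd, fb)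
      = ((l.foldl (pvStep1 cands) acc).map Prod.fst,
         (l.foldl (pvStep1 cands) acc).map Prod.snd, l.foldl pvStepFb fb) := by
  induction l generalizing acc fb with
  | nil => rfl
  | cons h t ih =>
    have hstep : pvStepB cands (acc.map Prod.fst, acc.map Prod.snd, fb) h
        = ((pvStep1 cands acc h).map Prod.fst, (pvStep1 cands acc h).map Prod.snd,
           pvStepFb fb h) := by
      simp only [pvStepB, pvStep1, pvStepFb]
      cases hidx : PySem.List.index? cands (pvNorm h) with
      | none => cases acc <;> simp
      | some r =>
        cases acc with
        | none => simp
        | some p =>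
          obtain ⟨b, bs⟩ := p
          by_cases hr : r ≤ b <;> simp [hr]
    simp only [List.foldl_cons, hstep, ih]

theorem pv_stepFb_some (l : List String) (x : String) :
    l.foldl pvStepFb (some x) = some x := by
  induction l with
  | nil => rfl
  | cons h t ih => simpa [pvStepFb] using ih

theorem pv_fb_eq (l : List String) : l.foldl pvStepFb none = pvFallbackA l := by
  induction l with
  | nil => rfl
  | cons h t ih =>
    have e1 : pvStepFb none h
        = if (pvNorm h == "sku" || PySem.Str.startswith (pvNorm h) "cod") then some h
          else none := rfl
    have e2 : pvFallbackA (h :: t)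
        = if (pvNorm h == "sku" || PySem.Str.startswith (pvNorm h) "cod") then some h
          else pvFallbackA t := rfl
    rw [List.foldl_cons, e1, e2]
    cases hc : (pvNorm h == "sku" || PySem.Str.startswith (pvNorm h) "cod") with
    | true => simp [pv_stepFb_some]
    | false => simpa using ih

-- invariant of pvBest ---------------------------------------------------------

theorem pv_ffind_snoc (l : List String) (h c : String) :
    pvFfind (l ++ [h]) c = if pvNorm h == c then some h else pvFfind l c := by
  simp only [pvFfind, List.reverse_append, List.reverse_singleton, List.singleton_append,
    List.find?]
  cases hb : (pvNorm h == c) <;> simp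

theorem pv_take_subset_take (cands : List String) (m n : Nat) (h : m ≤ n) (c : String)
    (hc : c ∈ cands.take m) : c ∈ cands.take n := by
  rw [List.mem_take_iff_getElem] at hc ⊢
  obtain ⟨j, hj, hcj⟩ := hc
  exact ⟨j, lt_min (lt_of_lt_of_le (lt_of_lt_of_le hj (min_le_left _ _)) h)
    (lt_of_lt_of_le hj (min_le_right _ _)), hcj⟩

theorem pv_best_inv (cands : List String) (l : List String) :
    ((pvBest cands l = none → ∀ c ∈ cands, pvFfind l c = none)
      ∧ ∀ r b, pvBest cands l = some (r, b) →
          PySem.List.index? cands (pvNorm b) = some r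
          ∧ pvFfind l (pvNorm b) = some b
          ∧ ∀ c ∈ cands.take r, pvFfind l c = none) := by
  induction l using List.reverseRecOn with
  | nil =>
    refine ⟨fun _ c _ => rfl, fun r b hb => by simp [pvBest] at hb⟩
  | append_singleton l h ih =>
    have hfold : pvBest cands (l ++ [h]) = pvStep1 cands (pvBest cands l) h := by
      simp [pvBest, List.foldl_append]
    obtain ⟨ihn, ihs⟩ := ih
    cases hidx : PySem.List.index? cands (pvNorm h) with
    | none =>
      -- h matches no candidate: nothing changes
      have hne : ∀ c ∈ cands, pvNorm h ≠ c := by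
        intro c hc hEq
        have : pvNorm h ∈ cands := hEq ▸ hc
        rw [PySem.List.index?_eq_none_iff] at hidx
        exact hidx this
      have hstep : pvBest cands (l ++ [h]) = pvBest cands l := by
        have hidx' : List.idxOf? (pvNorm h) cands = none := by simpa using hidx
        rw [hfold]
        unfold pvStep1
        cases pvBest cands l <;> simp [hidx']
      constructor
      · intro hn c hc
        rw [pv_ffind_snoc]
        have hb : (pvNorm h == c) = false := by simp [hne c hc]
        rw [hb, if_neg (by simp)]
        exact ihn (hstep ▸ hn) c hc
      · intro r b hb
        rw [hstep] at hb
        obtain ⟨h1, h2, h3⟩ := ihs r b hb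
        have hbmem : pvNorm b ∈ cands := by
          rw [← PySem.List.index?_isSome_iff (xs := cands) (v := pvNorm b), h1]; rfl
        refine ⟨h1, ?_, ?_⟩
        · rw [pv_ffind_snoc]
          have hb' : (pvNorm h == pvNorm b) = false := by simp [hne _ hbmem]
          rw [hb', if_neg (by simp)]; exact h2
        · intro c hc
          rw [pv_ffind_snoc]
          have hb' : (pvNorm h == c) = false := by
            simp [hne c (List.mem_of_mem_take hc)]
          rw [hb', if_neg (by simp)]; exact h3 c hc
    | some rh =>
      obtain ⟨hrh_lt, hrh_get, hrh_first⟩ := PySem.List.getElem_of_index?_eq_some hidx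
      have htake_ne : ∀ c ∈ cands.take rh, pvNorm h ≠ c := by
        intro c hc hEq
        rw [List.mem_take_iff_getElem] at hc
        obtain ⟨j, hj, hcj⟩ := hc
        exact hrh_first j (lt_of_lt_of_le hj (min_le_left _ _)) (hcj.trans hEq.symm)
      cases hacc : pvBest cands l with
      | none =>
        have hstep : pvBest cands (l ++ [h]) = some (rh, h) := by
          have hidx' : List.idxOf? (pvNorm h) cands = some rh := by simpa using hidx
          rw [hfold, hacc]; unfold pvStep1; simp [hidx']
        constructor
        · intro hn; rw [hstep] at hn; exact absurd hn (by simp)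
        · intro r b hb
          rw [hstep] at hb
          obtain ⟨hr, hbh⟩ := Prod.mk.inj (Option.some.inj hb)
          subst hr; subst hbh
          refine ⟨hidx, ?_, ?_⟩
          · rw [pv_ffind_snoc]; simp
          · intro c hc
            rw [pv_ffind_snoc]
            have hb' : (pvNorm h == c) = false := by simp [htake_ne c hc]
            rw [hb', if_neg (by simp)]
            exact ihn hacc c (List.mem_of_mem_take hc)
      | some p =>
        obtain ⟨br, bs⟩ := p
        obtain ⟨hb1, hb2, hb3⟩ := ihs br bs hacc
        by_cases hle : rh ≤ br
        · have hstep : pvBest cands (l ++ [h]) = some (rh, h) := by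
            have hidx' : List.idxOf? (pvNorm h) cands = some rh := by simpa using hidx
            rw [hfold, hacc]; unfold pvStep1; simp [hidx', hle]
          constructor
          · intro hn; rw [hstep] at hn; exact absurd hn (by simp)
          · intro r b hb
            rw [hstep] at hb
            obtain ⟨hr, hbh⟩ := Prod.mk.inj (Option.some.inj hb)
            subst hr; subst hbh
            refine ⟨hidx, ?_, ?_⟩
            · rw [pv_ffind_snoc]; simp
            · intro c hc
              rw [pv_ffind_snoc]
              have hb' : (pvNorm h == c) = false := by simp [htake_ne c hc]
              rw [hb', if_neg (by simp)]
              exact hb3 c (pv_take_subset_take cands _ _ hle c hc)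
        · have hgt : br < rh := Nat.lt_of_not_le hle
          have hstep : pvBest cands (l ++ [h]) = some (br, bs) := by
            have hidx' : List.idxOf? (pvNorm h) cands = some rh := by simpa using hidx
            rw [hfold, hacc]; unfold pvStep1; simp [hidx', hle]
          constructor
          · intro hn; rw [hstep] at hn; exact absurd hn (by simp)
          · intro r b hb
            rw [hstep] at hb
            obtain ⟨hr, hbh⟩ := Prod.mk.inj (Option.some.inj hb)
            subst hr; subst hbh
            have hhne : pvNorm h ≠ pvNorm bs := by
              intro hEq
              rw [← hEq, hidx] at hb1
              exact absurd (Option.some.inj hb1) (Nat.ne_of_lt hgt).symm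
            refine ⟨hb1, ?_, ?_⟩
            · rw [pv_ffind_snoc]
              have hb' : (pvNorm h == pvNorm bs) = false := by simp [hhne]
              rw [hb', if_neg (by simp)]; exact hb2
            · intro c hc
              rw [pv_ffind_snoc]
              have hcr : pvNorm h ≠ c :=
                htake_ne c (pv_take_subset_take cands _ _ (le_of_lt hgt) c hc)
              have hb' : (pvNorm h == c) = false := by simp [hcr]
              rw [hb', if_neg (by simp)]; exact hb3 c hc

-- the candidate loop computes the best match ----------------------------------

theorem pv_candLoopC_none (l : List String) (cs : List String)
    (h : ∀ c ∈ cs, pvFfind l c = none) : pvCandLoopC l cs = none := by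
  induction cs with
  | nil => rfl
  | cons c cs ih =>
    simp only [pvCandLoopC, h c (List.mem_cons_self ..)]
    exact ih fun c hc => h c (List.mem_cons_of_mem _ hc)

theorem pv_candLoopC_append (l : List String) (cs1 cs2 : List String) :
    pvCandLoopC l (cs1 ++ cs2)
      = match pvCandLoopC l cs1 with
        | some x => some x
        | none => pvCandLoopC l cs2 := by
  induction cs1 with
  | nil => simp [pvCandLoopC]
  | cons c cs ih =>
    simp only [List.cons_append, pvCandLoopC, ih]
    cases pvFfind l c <;> simp

theorem pv_candLoopC_eq_best (cands : List String) (l : List String) :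
    pvCandLoopC l cands = (pvBest cands l).map Prod.snd := by
  obtain ⟨hinvN, hinvS⟩ := pv_best_inv cands l
  cases hb : pvBest cands l with
  | none =>
    simp only [Option.map_none]
    exact pv_candLoopC_none l cands (hinvN hb)
  | some p =>
    obtain ⟨r, b⟩ := p
    obtain ⟨h1, h2, h3⟩ := hinvS r b hb
    obtain ⟨hr_lt, hr_get, _⟩ := PySem.List.getElem_of_index?_eq_some h1
    have hdrop : cands.drop r = pvNorm b :: cands.drop (r + 1) := by
      rw [List.drop_eq_getElem_cons hr_lt, hr_get]
    have hsplit := List.take_append_drop r cands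
    rw [← hsplit, pv_candLoopC_append, pv_candLoopC_none l _ h3, hdrop]
    simp [pvCandLoopC, h2]

-- ===== VERDICT (by name: the statement is the Claim_ definition above) =====
theorem autodetect_sku_header_spec : Claim_equal_autodetect_sku_header := by
  intro headers _
  have hsplit := pv_fold_split pvCands headers none none
  simp only [Option.map_none] at hsplit
  show autodetect_sku_header headers = autodetect_sku_header_alt headers
  simp only [autodetect_sku_header, autodetect_sku_header_alt]
  rw [hsplit, pv_candLoop_eq]
  rw [show List.map PySem.Str.lower pvCOMMON_SKU_HEADERS = pvCands from rfl]
  rw [show List.foldl (pvStep1 pvCands) none headers = pvBest pvCands headers from rfl]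
  rw [pv_candLoopC_eq_best pvCands, pv_fb_eq]
  cases hb : pvBest pvCands headers with
  | none => simp
  | some p => obtain ⟨r, b⟩ := p; simp
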